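-- pv_equiv track=rewrite | github.com/SmelchakovaAleksandra/2019-2-level-labs | lab_4/main.py | clean_tokenize_corpus
-- ===== SOURCE A (Python) =====
-- def clean_tokenize_corpus(texts: list) -> list:
--     corpus = []
--     if not texts or not isinstance(texts, list):
--         return corpus
--     for t in texts:
--         if not isinstance(t, str):
--             continue
--         clean_text = ''
--         t = t.replace('\n', ' ')
--         t = t.replace('<br />', ' ')
--         while '  ' in t:
--             t = t.replace('  ', ' ')
--         for symbol in t:
--             if symbol.isalpha() or symbol == ' ':
--                 clean_text += symbol.lower()
--         clean_text = clean_text.split()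
--         corpus.append(clean_text)
--     return corpus
-- ===== SOURCE B (Python) =====
-- def clean_tokenize_corpus(texts: list) -> list:
--     if not texts or not isinstance(texts, list):
--         return []
--     corpus = []
--     for t in texts:
--         if not isinstance(t, str):
--             continue
--         t = t.replace('\n', ' ').replace('<br />', ' ')
--         words = [w for w in (''.join(c for c in seg if c.isalpha()).lower() for seg in t.split(' ')) if w]
--         corpus.append(words)
--     return corpus
-- ===== Notes on version B (the rewrite author's own statement) =====
-- stated objective: simpler
-- what changed: B drops A's whole-string pipeline (repeated ' '->' ' collapsing loop, character-filter over the full text, final split()) and instead splits each text on literal spaces once and keeps the lowercased alphabetic characters of each segment, appending only non-empty words.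
import Mathlib
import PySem

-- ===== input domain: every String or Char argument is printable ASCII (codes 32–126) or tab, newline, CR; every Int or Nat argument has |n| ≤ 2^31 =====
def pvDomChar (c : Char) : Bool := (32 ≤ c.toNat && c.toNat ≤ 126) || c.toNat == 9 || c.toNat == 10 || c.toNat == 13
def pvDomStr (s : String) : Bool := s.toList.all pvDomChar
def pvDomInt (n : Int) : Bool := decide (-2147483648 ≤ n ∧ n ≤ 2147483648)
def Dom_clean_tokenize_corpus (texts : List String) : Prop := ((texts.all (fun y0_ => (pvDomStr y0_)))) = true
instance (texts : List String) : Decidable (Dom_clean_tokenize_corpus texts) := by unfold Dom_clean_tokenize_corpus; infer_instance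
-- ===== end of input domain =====

-- B splits each cleaned text on literal spaces first and then filters/lowercases each segment,
-- instead of A's filter-the-whole-string-then-split(); same return value, different decomposition (objective: simpler).


-- ===== PORT A =====
-- helper characterisation of one `t.replace('  ', ' ')` step, needed only for the
-- termination proof of the `while '  ' in t` loop below
def pvRep : List Char → List Char
  | [] => []
  | [c] => [c]
  | c :: d :: t => if c = ' ' ∧ d = ' ' then ' ' :: pvRep t else c :: pvRep (d :: t)

theorem pvReplaceGo_eq (fuel : ℕ) : ∀ (s acc : List Char), s.length ≤ fuel →
    PySem.Chars.replace.go [' ', ' '] [' '] fuel s acc = acc.reverse ++ pvRep s := by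
  induction fuel with
  | zero =>
    intro s acc h
    match s with
    | [] => simp [PySem.Chars.replace.go, pvRep]
    | c :: t => simp at h
  | succ n ih =>
    intro s acc h
    match s with
    | [] => simp [PySem.Chars.replace.go, pvRep]
    | [c] =>
      have : ([' ', ' '].isPrefixOf [c]) = false := by simp [List.isPrefixOf]
      simp [PySem.Chars.replace.go, this, pvRep, ih [] (c :: acc) (by simp)]
    | c :: d :: t =>
      by_cases hcd : c = ' ' ∧ d = ' '
      · obtain ⟨hc, hd⟩ := hcd
        subst hc hd
        have hpre : ([' ', ' '].isPrefixOf (' ' :: ' ' :: t)) = true := by simp [List.isPrefixOf]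
        simp only [PySem.Chars.replace.go, hpre, if_true]
        rw [show List.drop [' ', ' '].length (' ' :: ' ' :: t) = t from rfl,
            show ([' '].reverse ++ acc) = ' ' :: acc from rfl]
        rw [ih t (' ' :: acc) (by simp at h ⊢; omega)]
        simp [pvRep]
      · have hpre : ([' ', ' '].isPrefixOf (c :: d :: t)) = false := by
          simp [List.isPrefixOf]; intro h1 h2; exact hcd ⟨h1.symm, h2.symm⟩
        simp only [PySem.Chars.replace.go, hpre, Bool.false_eq_true, if_false]
        rw [ih (d :: t) (c :: acc) (by simp at h ⊢; omega)]
        simp [pvRep, hcd]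

theorem pvReplace_eq_pvRep (s : List Char) :
    PySem.Chars.replace s [' ', ' '] [' '] = pvRep s := by
  have h := pvReplaceGo_eq s.length s [] (le_refl _)
  simpa [PySem.Chars.replace] using h

theorem pvRep_len_le (s : List Char) : (pvRep s).length ≤ s.length := by
  induction s using pvRep.induct with
  | case1 => simp [pvRep]
  | case2 c => simp [pvRep]
  | case3 c d t h ih => simp [pvRep, h]; omega
  | case4 c d t h ih =>
    simp only [pvRep, if_neg h, List.length_cons]
    have := ih
    simp only [List.length_cons] at this
    omega

theorem pvRep_len_lt (s : List Char) (h : [' ', ' '] <:+: s) :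
    (pvRep s).length < s.length := by
  induction s using pvRep.induct with
  | case1 => simp at h
  | case2 c =>
    have := h.length_le
    simp at this
  | case3 c d t hcd ih =>
    have := pvRep_len_le t
    simp [pvRep, hcd]; omega
  | case4 c d t hcd ih =>
    have h' : [' ', ' '] <:+: d :: t := by
      rcases List.infix_cons_iff.mp h with hp | hi
      · exfalso
        rcases hp with ⟨r, hr⟩
        simp at hr
        exact hcd ⟨hr.1.symm, hr.2.1.symm⟩
      · exact hi
    have := ih h'
    simp only [List.length_cons] at this
    simp [pvRep, hcd]
    omega

theorem pvReplaceSpace_len_lt (s : List Char) (h : PySem.Chars.isIn [' ', ' '] s = true) :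
    (PySem.Chars.replace s [' ', ' '] [' ']).length < s.length := by
  rw [pvReplace_eq_pvRep]
  exact pvRep_len_lt s ((PySem.Chars.isIn_iff_infix _ _).mp h)

-- the `while '  ' in t: t = t.replace('  ', ' ')` loop
def pvCollapse (s : List Char) : List Char :=
  if h : PySem.Chars.isIn [' ', ' '] s = true then
    pvCollapse (PySem.Chars.replace s [' ', ' '] [' '])
  else s
termination_by s.length
decreasing_by exact pvReplaceSpace_len_lt s h

def clean_tokenize_corpus (texts : List String) : List (List String) :=
  if texts.isEmpty then []
  else
    texts.foldl (fun corpus t =>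
      let t1 := PySem.Str.replace t "\n" " "
      let t2 := PySem.Str.replace t1 "<br />" " "
      let t3 := pvCollapse t2.toList
      let clean_text := t3.foldl
        (fun acc c => if PySem.Chars.isalpha c || c == ' ' then acc ++ [PySem.Chars.lowerChar c] else acc)
        ([] : List Char)
      corpus ++ [(PySem.Chars.split₀ clean_text).map (fun w => String.mk w)]) []

-- ===== PORT B =====
def pvCleanWord (seg : List Char) : List Char :=
  PySem.Chars.lower (seg.filter (fun c => PySem.Chars.isalpha c))

def clean_tokenize_corpus_alt (texts : List String) : List (List String) :=
  if texts.isEmpty then []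
  else
    texts.map (fun t =>
      let t2 := PySem.Str.replace (PySem.Str.replace t "\n" " ") "<br />" " "
      (((PySem.Chars.splitOn t2.toList [' ']).map pvCleanWord).filter (fun w => w ≠ [])).map
        (fun w => String.mk w))

-- ===== PRECONDITION & SPEC =====
def Spec_clean_tokenize_corpus (texts : List String) (out : List (List String)) : Prop := out = clean_tokenize_corpus_alt texts
instance (texts : List String) (out : List (List String)) : Decidable (Spec_clean_tokenize_corpus texts out) := by unfold Spec_clean_tokenize_corpus; infer_instance

-- ===== CLAIM (what is proved, stated in full; the proofs are below) =====
def Claim_equal_clean_tokenize_corpus : Prop := ∀ (texts : List String), Dom_clean_tokenize_corpus texts → Spec_clean_tokenize_corpus texts (clean_tokenize_corpus texts)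

-- ===== LEMMAS AND PROOFS =====

-- common word-extraction spec: scan the string once, spaces end the current word,
-- alphabetic chars are lowered and appended to it, everything else is dropped
def pvWsAux : List Char → List Char → List (List Char)
  | [], cur => if cur = [] then [] else [cur]
  | c :: t, cur =>
    if c = ' ' then (if cur = [] then pvWsAux t [] else cur :: pvWsAux t [])
    else if PySem.Chars.isalpha c then pvWsAux t (cur ++ [PySem.Chars.lowerChar c])
    else pvWsAux t cur

-- (first segment, later segments) of a split on the literal space
def pvSpAux : List Char → List Char × List (List Char)
  | [] => ([], [])
  | c :: t =>
    let p := pvSpAux t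
    if c = ' ' then ([], p.1 :: p.2) else (c :: p.1, p.2)

-- character facts
theorem pv_lower_space : PySem.Chars.lowerChar ' ' = ' ' := by decide

theorem pv_isspace_space : PySem.Chars.isspace ' ' = true := by decide

theorem pv_alpha_bounds (c : Char) (h : PySem.Chars.isalpha c = true) :
    (65 ≤ c.toNat ∧ c.toNat ≤ 90) ∨ (97 ≤ c.toNat ∧ c.toNat ≤ 122) := by
  simp only [PySem.Chars.isalpha, PySem.Chars.isupper, PySem.Chars.islower, Bool.or_eq_true,
    Bool.and_eq_true, decide_eq_true_eq, Char.le_def, UInt32.le_iff_toNat_le] at h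
  simp only [Char.toNat] at *
  exact h

theorem pv_isspace_lower_alpha (c : Char) (h : PySem.Chars.isalpha c = true) :
    PySem.Chars.isspace (PySem.Chars.lowerChar c) = false := by
  have hb := pv_alpha_bounds c h
  unfold PySem.Chars.lowerChar
  by_cases hu : PySem.Chars.isupper c = true
  · have hub : 65 ≤ c.toNat ∧ c.toNat ≤ 90 := by
      simp only [PySem.Chars.isupper, Bool.and_eq_true, decide_eq_true_eq, Char.le_def,
        UInt32.le_iff_toNat_le] at hu
      simp only [Char.toNat] at *
      exact hu
    have hv : (Char.ofNat (c.toNat + 32)).toNat = c.toNat + 32 := by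
      simp only [Char.toNat_ofNat, Nat.isValidChar]
      rw [if_pos (Or.inl (by omega))]
    simp only [hu, if_true]
    simp [PySem.Chars.isspace, hv]
    omega
  · have hlb : 97 ≤ c.toNat ∧ c.toNat ≤ 122 := by
      rcases hb with h1 | h1
      · exfalso
        apply hu
        simp only [PySem.Chars.isupper, Bool.and_eq_true, decide_eq_true_eq, Char.le_def,
          UInt32.le_iff_toNat_le]
        simp only [Char.toNat] at *
        exact h1
      · exact h1
    simp only [hu, Bool.false_eq_true, if_false]
    simp [PySem.Chars.isspace]
    omega

-- A side: split₀ over the filtered-and-lowered string computes pvWsAux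
theorem pvA_go_eq : ∀ (s : List Char) (cur : List Char) (acc : List (List Char)),
    PySem.Chars.split₀.go ((s.filter (fun c => PySem.Chars.isalpha c || c == ' ')).map PySem.Chars.lowerChar) cur acc
      = acc.reverse ++ pvWsAux s cur.reverse := by
  intro s
  induction s with
  | nil =>
    intro cur acc
    by_cases hc : cur = []
    · simp [PySem.Chars.split₀.go, pvWsAux, hc]
    · simp [PySem.Chars.split₀.go, pvWsAux, hc, List.isEmpty_iff]
  | cons c t ih =>
    intro cur acc
    by_cases hsp : c = ' '
    · subst hsp
      by_cases hc : cur = []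
      · simp [pvWsAux, hc, PySem.Chars.split₀.go, pv_lower_space, pv_isspace_space, ih,
          List.isEmpty_iff]
      · simp [pvWsAux, hc, PySem.Chars.split₀.go, pv_lower_space, pv_isspace_space, ih,
          List.isEmpty_iff]
    · by_cases ha : PySem.Chars.isalpha c = true
      · have h1 := pv_isspace_lower_alpha c ha
        simp [pvWsAux, hsp, ha, PySem.Chars.split₀.go, h1, ih]
      · simp [pvWsAux, hsp, ha, Bool.not_eq_true] at *
        simp [List.filter_cons, ha, hsp, pvWsAux, ih]

theorem pvA_eq_wsAux (s : List Char) :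
    PySem.Chars.split₀ ((s.filter (fun c => PySem.Chars.isalpha c || c == ' ')).map PySem.Chars.lowerChar)
      = pvWsAux s [] := by
  have := pvA_go_eq s [] []
  simpa [PySem.Chars.split₀] using this

-- B side: splitOn on ' ' computes pvSpAux
theorem pvSplitOnGo_eq (fuel : ℕ) : ∀ (s cur : List Char) (acc : List (List Char)),
    s.length < fuel →
    PySem.Chars.splitOn.go [' '] fuel s cur acc
      = acc.reverse ++ ((cur.reverse ++ (pvSpAux s).1) :: (pvSpAux s).2) := by
  induction fuel with
  | zero => intro s cur acc h; omega
  | succ n ih =>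
    intro s cur acc h
    match s with
    | [] => simp [PySem.Chars.splitOn.go, pvSpAux]
    | c :: t =>
      by_cases hc : c = ' '
      · subst hc
        have hpre : ([' '].isPrefixOf (' ' :: t)) = true := by simp [List.isPrefixOf]
        simp only [PySem.Chars.splitOn.go, hpre, if_true]
        rw [show List.drop [' '].length (' ' :: t) = t from rfl]
        rw [ih t [] (cur.reverse :: acc) (by simp at h ⊢; omega)]
        simp [pvSpAux]
      · have hpre : ([' '].isPrefixOf (c :: t)) = false := by
          simp [List.isPrefixOf]; exact fun h' => hc h'.symm
        simp only [PySem.Chars.splitOn.go, hpre, Bool.false_eq_true, if_false]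
        rw [ih t (c :: cur) acc (by simp at h ⊢; omega)]
        simp [pvSpAux, hc]

theorem pvSplitOn_space (s : List Char) :
    PySem.Chars.splitOn s [' '] = (pvSpAux s).1 :: (pvSpAux s).2 := by
  have := pvSplitOnGo_eq (s.length + 1) s [] [] (by omega)
  simpa [PySem.Chars.splitOn] using this

-- B side: map-and-filter over the segments computes pvWsAux
theorem pvB_eq_wsAux : ∀ (s d : List Char),
    ((d ++ pvCleanWord (pvSpAux s).1) :: ((pvSpAux s).2.map pvCleanWord)).filter (fun w => w ≠ [])
      = pvWsAux s d := by
  intro s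
  induction s with
  | nil =>
    intro d
    by_cases hd : d = []
    · simp [pvSpAux, pvCleanWord, PySem.Chars.lower, pvWsAux, hd]
    · simp [pvSpAux, pvCleanWord, PySem.Chars.lower, pvWsAux, hd, List.filter_cons]
  | cons c t ih =>
    intro d
    by_cases hc : c = ' '
    · subst hc
      by_cases hd : d = []
      · simp only [pvSpAux, if_pos rfl, pvWsAux, hd, if_pos rfl]
        have := ih []
        simpa [List.filter_cons] using this
      · simp only [pvSpAux, if_pos rfl, pvWsAux, if_neg hd]
        have := ih []
        simp only [List.nil_append] at this
        simp [List.filter_cons, hd, pvCleanWord, PySem.Chars.lower, ← this]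
    · by_cases ha : PySem.Chars.isalpha c = true
      · have : pvCleanWord (c :: (pvSpAux t).1) = PySem.Chars.lowerChar c :: pvCleanWord (pvSpAux t).1 := by
          simp [pvCleanWord, PySem.Chars.lower, List.filter_cons, ha]
        simp only [pvSpAux, if_neg hc, pvWsAux, if_neg hc, if_pos ha]
        rw [this]
        have := ih (d ++ [PySem.Chars.lowerChar c])
        simpa using this
      · have : pvCleanWord (c :: (pvSpAux t).1) = pvCleanWord (pvSpAux t).1 := by
          simp [pvCleanWord, PySem.Chars.lower, List.filter_cons, ha]
        simp only [pvSpAux, if_neg hc, pvWsAux, if_neg hc, if_neg ha]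
        rw [this]
        exact ih d

-- pvWsAux is invariant under one '  ' -> ' ' replacement …
theorem pvWsAux_pvRep (s : List Char) : ∀ cur, pvWsAux (pvRep s) cur = pvWsAux s cur := by
  induction s using pvRep.induct with
  | case1 => intro cur; rfl
  | case2 c => intro cur; rfl
  | case3 c d t h ih =>
    obtain ⟨hc, hd⟩ := h
    subst hc hd
    intro cur
    rw [show pvRep (' ' :: ' ' :: t) = ' ' :: pvRep t by simp [pvRep]]
    by_cases hcur : cur = []
    · simp [pvWsAux, hcur, ih]
    · simp [pvWsAux, hcur, ih]
  | case4 c d t h ih =>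
    intro cur
    simp only [pvRep, if_neg h]
    by_cases hsp : c = ' '
    · by_cases hcur : cur = [] <;> simp [pvWsAux, hsp, hcur, ih]
    · by_cases ha : PySem.Chars.isalpha c = true <;> simp [pvWsAux, hsp, ha, ih]

-- … hence under the whole while-loop
theorem pvWsAux_pvCollapse (s : List Char) : ∀ cur, pvWsAux (pvCollapse s) cur = pvWsAux s cur := by
  induction s using pvCollapse.induct with
  | case1 s h ih =>
    intro cur
    rw [pvCollapse, dif_pos h, ih cur, pvReplace_eq_pvRep, pvWsAux_pvRep]
  | case2 s h =>
    rw [pvCollapse, dif_neg h]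
    intro cur
    rfl

-- per-text equality
theorem pv_per_text (cs : List Char) :
    (PySem.Chars.split₀ ((pvCollapse cs).foldl
        (fun acc c => if PySem.Chars.isalpha c || c == ' ' then acc ++ [PySem.Chars.lowerChar c] else acc)
        ([] : List Char))).map (fun w => String.mk w)
      = (((PySem.Chars.splitOn cs [' ']).map pvCleanWord).filter (fun w => w ≠ [])).map
          (fun w => String.mk w) := by
  rw [PySem.List.foldl_append_if (fun c => PySem.Chars.isalpha c || c == ' ') PySem.Chars.lowerChar
      (pvCollapse cs) []]
  rw [List.nil_append, pvA_eq_wsAux, pvWsAux_pvCollapse]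
  rw [pvSplitOn_space]
  have := pvB_eq_wsAux cs []
  simp only [List.nil_append] at this
  rw [List.map_cons, this]

-- ===== VERDICT (by name: the statement is the Claim_ definition above) =====
theorem clean_tokenize_corpus_spec : Claim_equal_clean_tokenize_corpus := by
  intro texts _
  unfold Spec_clean_tokenize_corpus clean_tokenize_corpus clean_tokenize_corpus_alt
  by_cases he : texts.isEmpty
  · simp [he]
  · simp only [he, Bool.false_eq_true, if_false]
    rw [PySem.List.foldl_append_singleton_eq_map
      (fun t =>
        (PySem.Chars.split₀ ((pvCollapse (PySem.Str.replace (PySem.Str.replace t "\n" " ") "<br />" " ").toList).foldl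
          (fun acc c => if PySem.Chars.isalpha c || c == ' ' then acc ++ [PySem.Chars.lowerChar c] else acc)
          ([] : List Char))).map (fun w => String.mk w)) texts []]
    rw [List.nil_append]
    apply List.map_congr_left
    intro t _
    exact pv_per_text (PySem.Str.replace (PySem.Str.replace t "\n" " ") "<br />" " ").toList
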